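-- pv_equiv track=rewrite | github.com/horimpark/code-playground | codewars/6kyu/Recognize The Words.py | all_space_variants
-- ===== SOURCE A (Python) =====
-- def all_space_variants(s: str) -> list[str]:
--     n = len(s)
--     if n <= 1:
--         return [s]
--
--     results = []
--     for mask in range(1 << (n - 1)):
--         parts = [s[0]]
--         for i in range(n - 1):
--             if mask & (1 << i):
--                 parts.append(" ")
--             parts.append(s[i + 1])
--         results.append("".join(parts))
--
--     return results
-- ===== SOURCE B (Python) =====
-- def all_space_variants(s: str) -> list[str]:
--     if len(s) <= 1:
--         return [s]
--     sub = all_space_variants(s[1:])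
--     out = []
--     for r in sub:
--         out.append(s[0] + r)
--         out.append(s[0] + " " + r)
--     return out
-- ===== Notes on version B (the rewrite author's own statement) =====
-- stated objective: alternative
-- what changed: Replaces the bitmask enumeration with nested index loops by a recursion on the string tail that doubles the result list (no-space then space variant per sub-result), reproducing the same mask order.
import Mathlib
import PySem

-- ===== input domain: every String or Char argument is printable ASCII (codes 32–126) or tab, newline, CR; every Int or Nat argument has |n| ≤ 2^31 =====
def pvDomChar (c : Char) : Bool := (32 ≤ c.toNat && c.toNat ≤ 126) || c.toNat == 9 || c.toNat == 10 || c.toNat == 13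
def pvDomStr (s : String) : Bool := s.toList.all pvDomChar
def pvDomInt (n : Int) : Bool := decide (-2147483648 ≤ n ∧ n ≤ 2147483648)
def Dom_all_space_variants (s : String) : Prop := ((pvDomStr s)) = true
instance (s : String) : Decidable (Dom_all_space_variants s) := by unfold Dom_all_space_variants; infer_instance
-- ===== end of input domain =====

-- B replaces A's bitmask enumeration by a recursion on the string tail that doubles the
-- result list (no-space variant, then space variant, per sub-result), reproducing A's order.

-- ===== PORT A =====
-- Literal port of A: for each mask in range(1 << (n-1)) build the parts list by testing
-- bit i of the mask (indices from pyRange are nonnegative, so `.toNat` on them is exact).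
def all_space_variants (s : String) : List String :=
  let cs := s.toList
  let n := cs.length
  if n ≤ 1 then [s]
  else
    (PySem.List.pyRange 0 ((1 <<< (n - 1) : Nat) : Int) 1).foldl
      (fun results mask =>
        let parts :=
          (PySem.List.pyRange 0 ((n - 1 : Nat) : Int) 1).foldl
            (fun parts i =>
              let parts :=
                if PySem.Int.band mask ((1 : Int) <<< i.toNat) ≠ 0 then parts ++ [[' ']]
                else parts
              parts ++ [[PySem.List.pyGetD cs (i + 1) ' ']])
            [[PySem.List.pyGetD cs 0 ' ']]
        results ++ [String.ofList (PySem.Chars.join [] parts)])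
      []

-- ===== PORT B =====
-- B's recursion, on the char-list side (strings are concatenations of chars).
def altChars : List Char → List (List Char)
  | [] => [[]]
  | [c] => [[c]]
  | c :: d :: ds =>
      (altChars (d :: ds)).foldl (fun out r => out ++ [c :: r, c :: ' ' :: r]) []

def all_space_variants_alt (s : String) : List String :=
  (altChars s.toList).map String.ofList

-- ===== PRECONDITION & SPEC =====
def Spec_all_space_variants (s : String) (out : List String) : Prop := out = all_space_variants_alt s
instance (s : String) (out : List String) : Decidable (Spec_all_space_variants s out) := by unfold Spec_all_space_variants; infer_instance

-- ===== CLAIM (what is proved, stated in full; the proofs are below) =====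
def Claim_equal_all_space_variants : Prop := ∀ (s : String), Dom_all_space_variants s → Spec_all_space_variants s (all_space_variants s)

-- ===== LEMMAS AND PROOFS =====

-- The string built for mask m, minus the leading character: for each remaining char,
-- bit i of m decides whether a space precedes it.
def tailBuild : List Char → Nat → List Char
  | [], _ => []
  | d :: ds, m => (if m % 2 = 1 then [' ', d] else [d]) ++ tailBuild ds (m / 2)

lemma range_two_mul_map {α : Type} (g : Nat → α) :
    ∀ N, (List.range (2 * N)).map g
      = (List.range N).flatMap (fun m => [g (2 * m), g (2 * m + 1)]) := by
  intro N
  induction N with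
  | zero => rfl
  | succ N ih =>
      have h2 : 2 * (N + 1) = (2 * N + 1) + 1 := by omega
      rw [h2, List.range_succ, List.range_succ, List.range_succ]
      simp [ih]

lemma altChars_eq (cs : List Char) : ∀ c : Char,
    altChars (c :: cs) = (List.range (2 ^ cs.length)).map (fun m => c :: tailBuild cs m) := by
  induction cs with
  | nil => intro c; rfl
  | cons d ds ih =>
      intro c
      have hfold : ∀ (L : List (List Char)) (acc : List (List Char)),
          L.foldl (fun out r => out ++ [c :: r, c :: ' ' :: r]) acc
            = acc ++ L.flatMap (fun r => [c :: r, c :: ' ' :: r]) := by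
        intro L
        induction L with
        | nil => simp
        | cons r rs ihL => intro acc; simp [ihL]
      rw [show altChars (c :: d :: ds)
            = (altChars (d :: ds)).foldl (fun out r => out ++ [c :: r, c :: ' ' :: r]) [] from rfl,
          hfold, ih d]
      rw [show (2 : Nat) ^ (d :: ds).length = 2 * 2 ^ ds.length by
            simp [List.length_cons, pow_succ]; ring]
      rw [range_two_mul_map (fun m => c :: tailBuild (d :: ds) m)]
      simp [List.flatMap_map, tailBuild, Nat.mul_add_div, Nat.mul_mod_right]

lemma foldParts (cs : List Char) : ∀ (m : Nat) (acc : List (List Char)),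
    ((List.range cs.length).foldl
      (fun parts i => (if m.testBit i then parts ++ [[' ']] else parts) ++ [[cs.getD i ' ']])
      acc).flatten
    = acc.flatten ++ tailBuild cs m := by
  induction cs with
  | nil => intro m acc; simp [tailBuild]
  | cons d ds ih =>
      intro m acc
      rw [List.length_cons, List.range_succ_eq_map]
      simp only [List.foldl_cons, List.foldl_map]
      have hb : (fun (parts : List (List Char)) (i : Nat) =>
          (if m.testBit (i+1) then parts ++ [[' ']] else parts) ++ [[(d :: ds).getD (i+1) ' ']])
          = (fun parts i =>
          (if (m/2).testBit i then parts ++ [[' ']] else parts) ++ [[ds.getD i ' ']]) := by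
        funext parts i
        simp [Nat.testBit_add_one]
      rw [hb, ih (m/2)]
      by_cases h0 : m % 2 = 1 <;>
        simp [tailBuild, h0, Nat.testBit_zero]

lemma pyRange_nat (n : Nat) :
    PySem.List.pyRange 0 (n : Int) 1 = (List.range n).map (fun k => Int.ofNat k) := by
  rw [PySem.List.pyRange_one]; simp [List.map_eq_flatMap]

lemma join_empty_sep (xs : List (List Char)) : PySem.Chars.join [] xs = xs.flatten := by
  induction xs with
  | nil => rfl
  | cons y ys ih =>
      cases ys <;> simp_all [PySem.Chars.join, List.intercalate, List.intersperse, List.flatten]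

lemma one_shl_int (k : Nat) : ((1:Int) <<< ((k:Nat):Int)) = ((2^k : Nat) : Int) := by
  rw [show ((k:Nat):Int) = Int.ofNat k from rfl,
    show ((1:Int) <<< Int.ofNat k) = ((Nat.shiftLeft' false 1 k : Nat) : Int) from rfl]
  simp [Nat.shiftLeft'_false, Nat.shiftLeft_eq]

lemma band_bit (m k : Nat) :
    (PySem.Int.band ((m:Nat):Int) (((2^k : Nat) : Nat) : Int) ≠ 0) ↔ m.testBit k := by
  rw [PySem.Int.band_natCast]
  simp [Nat.and_two_pow]

lemma getD_shift (c : Char) (cs : List Char) (y : Nat) :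
    PySem.List.pyGetD (c :: cs) ((y:Int) + 1) ' ' = cs.getD y ' ' := by
  rw [show ((y:Int) + 1) = ((y+1 : Nat):Int) by push_cast; ring, PySem.List.pyGetD_natCast]
  simp

lemma A_side (c : Char) (cs : List Char) (s : String)
    (h : s.toList = c :: cs) (hcs : cs ≠ []) :
    all_space_variants s
      = (List.range (2 ^ cs.length)).map (fun m => String.ofList (c :: tailBuild cs m)) := by
  have hlen : ¬((c :: cs).length ≤ 1) := by
    cases cs with
    | nil => exact absurd rfl hcs
    | cons d ds => simp
  have hpos : 0 < cs.length := List.length_pos_iff.mpr hcs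
  unfold all_space_variants
  simp only [h, List.length_cons, Nat.add_sub_cancel]
  rw [if_neg (by omega : ¬ cs.length + 1 ≤ 1)]
  rw [pyRange_nat, pyRange_nat]
  simp only [List.foldl_map]
  rw [PySem.List.foldl_append_singleton_eq_map]
  rw [show (1 <<< cs.length) = 2 ^ cs.length by simp [Nat.shiftLeft_eq]]
  simp only [List.nil_append]
  refine List.map_congr_left (fun m _ => ?_)
  simp only [Int.ofNat_eq_natCast, Int.toNat_natCast, one_shl_int, band_bit, getD_shift,
    PySem.List.pyGetD_zero_cons]
  rw [join_empty_sep, foldParts cs m [[c]]]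
  simp

theorem all_space_variants_spec : Claim_equal_all_space_variants := by
  intro s _
  unfold Spec_all_space_variants
  have hs' : s = String.ofList s.toList := String.ofList_toList.symm
  match hs : s.toList with
  | [] =>
      rw [all_space_variants, all_space_variants_alt]
      simp [hs, altChars]
      rw [hs', hs]
  | [c] =>
      rw [all_space_variants, all_space_variants_alt]
      simp [hs, altChars]
      rw [hs', hs]
  | c :: d :: ds =>
      rw [A_side c (d :: ds) s hs (by simp), all_space_variants_alt, hs,
        altChars_eq (d :: ds) c]
      simp [List.map_map]
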